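-- pv_equiv track=rewrite | github.com/MohanaPriya-01072006/resume-analyzer | job_matcher.py | recommend_jobs
-- ===== SOURCE A (Python) =====
-- def recommend_jobs(skills):
--     job_roles = {
--         "AI Engineer": ["python", "machine learning", "nlp", "deep learning"],
--         "Full Stack Developer": ["javascript", "react", "node", "html", "css"],
--         "Data Analyst": ["sql", "excel", "statistics", "python", "visualization"]
--     }
--     recommendations = []
--     for role, required in job_roles.items():
--         match = len(set(skills).intersection(set(required)))
--         if match > 1:
--             recommendations.append(role)
--     return recommendations
-- ===== SOURCE B (Python) =====
-- def recommend_jobs(skills):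
--     ai_req = ["python", "machine learning", "nlp", "deep learning"]
--     fs_req = ["javascript", "react", "node", "html", "css"]
--     da_req = ["sql", "excel", "statistics", "python", "visualization"]
--     ai = fs = da = 0
--     seen = set()
--     for s in skills:
--         if s not in seen:
--             seen.add(s)
--             if s in ai_req:
--                 ai += 1
--             if s in fs_req:
--                 fs += 1
--             if s in da_req:
--                 da += 1
--     out = []
--     if ai > 1:
--         out.append("AI Engineer")
--     if fs > 1:
--         out.append("Full Stack Developer")
--     if da > 1:
--         out.append("Data Analyst")
--     return out
-- ===== Notes on version B (the rewrite author's own statement) =====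
-- stated objective: alternative
-- what changed: B replaces A's per-role set construction and intersection by a single pass over skills that skips duplicates via a seen-set and maintains three scalar match counters, then builds the output from three conditionals.
import Mathlib
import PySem

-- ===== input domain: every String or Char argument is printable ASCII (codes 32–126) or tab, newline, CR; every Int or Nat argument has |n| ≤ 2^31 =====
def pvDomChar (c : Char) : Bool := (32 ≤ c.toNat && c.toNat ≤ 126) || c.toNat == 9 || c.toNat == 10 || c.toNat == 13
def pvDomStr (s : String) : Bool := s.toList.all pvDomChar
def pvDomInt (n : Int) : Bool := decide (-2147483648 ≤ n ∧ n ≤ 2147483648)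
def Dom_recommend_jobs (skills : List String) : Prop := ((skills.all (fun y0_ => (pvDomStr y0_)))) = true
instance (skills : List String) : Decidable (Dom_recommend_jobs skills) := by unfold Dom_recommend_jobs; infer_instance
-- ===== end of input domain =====

-- B replaces A's per-role set intersections by a single pass over skills with a seen-set and three scalar counters (alternative decomposition, same cost).


-- ===== PORT A =====
-- A's job_roles dict literal (read-only data)
def pvJobRolesA : List (String × List String) :=
  [("AI Engineer", ["python", "machine learning", "nlp", "deep learning"]),
   ("Full Stack Developer", ["javascript", "react", "node", "html", "css"]),
   ("Data Analyst", ["sql", "excel", "statistics", "python", "visualization"])]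

def recommend_jobs (skills : List String) : List String :=
  pvJobRolesA.foldl
    (fun recommendations p =>
      let matchN := PySem.Set.len (PySem.Set.inter (PySem.Set.ofList skills) (PySem.Set.ofList p.2))
      if 1 < matchN then recommendations ++ [p.1] else recommendations) []

-- ===== PORT B =====
-- B's three required-skill lists
def pvAiReq : List String := ["python", "machine learning", "nlp", "deep learning"]
def pvFsReq : List String := ["javascript", "react", "node", "html", "css"]
def pvDaReq : List String := ["sql", "excel", "statistics", "python", "visualization"]

-- B's single counting pass: seen-set plus three scalar counters
def pvCountPass : List String → PySem.Set String → Int → Int → Int → Int × Int × Int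
  | [], _, ai, fs, da => (ai, fs, da)
  | s :: rest, seen, ai, fs, da =>
      if PySem.Set.contains seen s then
        pvCountPass rest seen ai fs da
      else
        pvCountPass rest (PySem.Set.add seen s)
          (ai + (if s ∈ pvAiReq then 1 else 0))
          (fs + (if s ∈ pvFsReq then 1 else 0))
          (da + (if s ∈ pvDaReq then 1 else 0))

def recommend_jobs_alt (skills : List String) : List String :=
  let c := pvCountPass skills PySem.Set.empty 0 0 0
  (if 1 < c.1 then ["AI Engineer"] else []) ++
  (if 1 < c.2.1 then ["Full Stack Developer"] else []) ++
  (if 1 < c.2.2 then ["Data Analyst"] else [])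

-- ===== PRECONDITION & SPEC =====
def Spec_recommend_jobs (skills : List String) (out : List String) : Prop := out = recommend_jobs_alt skills
instance (skills : List String) (out : List String) : Decidable (Spec_recommend_jobs skills out) := by unfold Spec_recommend_jobs; infer_instance

-- ===== CLAIM (what is proved, stated in full; the proofs are below) =====
def Claim_equal_recommend_jobs : Prop := ∀ (skills : List String), Dom_recommend_jobs skills → Spec_recommend_jobs skills (recommend_jobs skills)

-- ===== LEMMAS AND PROOFS =====

-- each counter of the pass equals its start plus the number of NEW distinct elements lying in its required list
lemma pvCountPass_spec (xs : List String) : ∀ (seen : PySem.Set String) (ai fs da : Int),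
    pvCountPass xs seen ai fs da =
      (ai + ((xs.foldl PySem.Set.add seen).countP (· ∈ pvAiReq) : Int) - (seen.countP (· ∈ pvAiReq) : Int),
       fs + ((xs.foldl PySem.Set.add seen).countP (· ∈ pvFsReq) : Int) - (seen.countP (· ∈ pvFsReq) : Int),
       da + ((xs.foldl PySem.Set.add seen).countP (· ∈ pvDaReq) : Int) - (seen.countP (· ∈ pvDaReq) : Int)) := by
  induction xs with
  | nil => intro seen ai fs da; simp [pvCountPass]
  | cons s rest ih =>
      intro seen ai fs da
      by_cases hs : PySem.Set.contains seen s
      · have hadd : PySem.Set.add seen s = seen := by simp [PySem.Set.add, List.mem_of_elem_eq_true hs]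
        simp only [pvCountPass, hs, if_true, List.foldl_cons, hadd]
        exact ih seen ai fs da
      · have hmem : s ∉ seen := fun h => hs (List.elem_eq_true_of_mem h)
        have hadd : PySem.Set.add seen s = seen ++ [s] := by simp [PySem.Set.add, hmem]
        simp only [pvCountPass, hs, List.foldl_cons, ih, hadd, List.countP_append,
          List.countP_cons, List.countP_nil]
        refine Prod.ext ?_ (Prod.ext ?_ ?_) <;> simp <;> split_ifs <;> ring

-- A's intersection size equals the count of distinct skills lying in req
lemma pvInter_len (skills req : List String) :
    PySem.Set.len (PySem.Set.inter (PySem.Set.ofList skills) (PySem.Set.ofList req))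
      = ((PySem.Set.ofList skills).countP (fun s => s ∈ req) : Int) := by
  have h1 : PySem.Set.inter (PySem.Set.ofList skills) (PySem.Set.ofList req)
      = (PySem.Set.ofList skills).filter (fun x => PySem.Set.contains (PySem.Set.ofList req) x) := rfl
  have h2 : (PySem.Set.ofList skills).countP (fun x => PySem.Set.contains (PySem.Set.ofList req) x)
      = (PySem.Set.ofList skills).countP (fun s => s ∈ req) := by
    apply List.countP_congr
    intro x _
    simp [PySem.Set.mem_ofList]
  simp only [PySem.Set.len, h1, ← h2, List.countP_eq_length_filter]

-- ===== VERDICT (by name: the statement is the Claim_ definition above) =====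
theorem recommend_jobs_spec : Claim_equal_recommend_jobs := by
  intro skills _
  unfold Spec_recommend_jobs recommend_jobs recommend_jobs_alt
  rw [pvCountPass_spec skills PySem.Set.empty 0 0 0]
  have hof : List.foldl PySem.Set.add ([] : List String) skills = PySem.Set.ofList skills :=
    (PySem.Set.ofList_eq_foldl skills).symm
  simp only [pvJobRolesA, List.foldl_cons, List.foldl_nil, pvInter_len, hof,
    PySem.Set.empty, List.countP_nil, pvAiReq, pvFsReq, pvDaReq]
  norm_num
  split_ifs <;> simp
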